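-- pv_equiv track=rewrite | github.com/hasslerb/aoc | src/day_7_2.py | insert_to_sorted_list
-- ===== SOURCE A (Python) =====
-- def insert_to_sorted_list(id, element, sorted_list):
--
--     if len(sorted_list) == 0:
--         sorted_list = [(id, element)]
--     else:
--         for index, value in enumerate(sorted_list):
--             # Assuming y is in increasing order.
--             if value[0] > id:
--                 sorted_list.insert(index, (id, element))
--                 break
--         else:
--             sorted_list.append((id, element))
--     return sorted_list
-- ===== SOURCE B (Python) =====
-- def insert_to_sorted_list(id, element, sorted_list):
--     if len(sorted_list) == 0:
--         return [(id, element)]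
--     # binary search (bisect_right on the id key) for the insertion point
--     lo, hi = 0, len(sorted_list)
--     while lo < hi:
--         mid = (lo + hi) // 2
--         if sorted_list[mid][0] <= id:
--             lo = mid + 1
--         else:
--             hi = mid
--     sorted_list.insert(lo, (id, element))
--     return sorted_list
-- ===== Notes on version B (the rewrite author's own statement) =====
-- stated objective: alternative
-- what changed: Replaces A's linear enumerate-scan for the first id greater than the new one by a hand-written bisect_right binary search on the id key, inserting at the found index (which naturally appends when the index equals the length).
-- outside the precondition, e.g. on insert_to_sorted_list(4, 0, [(5, 1), (3, 2)]): A returns [(4, 0), (5, 1), (3, 2)], B returns [(5, 1), (3, 2), (4, 0)]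
import Mathlib
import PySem

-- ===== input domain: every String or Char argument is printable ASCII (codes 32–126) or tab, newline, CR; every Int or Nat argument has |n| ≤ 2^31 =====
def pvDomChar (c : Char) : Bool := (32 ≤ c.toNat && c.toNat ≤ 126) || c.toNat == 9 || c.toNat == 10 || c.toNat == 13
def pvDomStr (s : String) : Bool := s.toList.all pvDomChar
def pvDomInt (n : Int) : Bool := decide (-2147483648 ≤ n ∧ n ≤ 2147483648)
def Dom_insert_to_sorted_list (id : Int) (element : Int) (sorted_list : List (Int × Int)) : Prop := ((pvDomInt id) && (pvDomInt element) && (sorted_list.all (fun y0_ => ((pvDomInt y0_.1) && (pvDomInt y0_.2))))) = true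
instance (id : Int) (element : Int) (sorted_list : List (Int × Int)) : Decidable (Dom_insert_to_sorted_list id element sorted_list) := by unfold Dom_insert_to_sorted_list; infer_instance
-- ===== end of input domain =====

-- B replaces A's linear scan by a binary search (bisect_right on the id key) for the insertion
-- point; note both A and B mutate the argument list in place in the non-empty case (the
-- equivalence proved here is about the return value).

-- ===== PORT A =====
-- the 'for index, value in enumerate(sorted_list): … else: append' loop, carrying the index and
-- the original list (Python inserts into the list it iterates but breaks immediately)
def pvAScan (id element : Int) (orig : List (Int × Int)) : List (Int × Int) → Nat → List (Int × Int)
  | [], _ => orig ++ [(id, element)]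
  | v :: rest, index =>
      if v.1 > id then PySem.List.insert orig (index : Int) (id, element)
      else pvAScan id element orig rest (index + 1)

def insert_to_sorted_list (id : Int) (element : Int) (sorted_list : List (Int × Int)) : List (Int × Int) :=
  if sorted_list.length = 0 then [(id, element)]
  else pvAScan id element sorted_list sorted_list 0

-- ===== PORT B =====
-- the 'while lo < hi' bisect_right loop; sorted_list[mid] is ported as getD (mid is always in
-- range: lo ≤ mid < hi ≤ len, so the default is never read)
def pvBisect (id : Int) (l : List (Int × Int)) (lo hi : Nat) : Nat :=
  if _h : lo < hi then
    let mid := (lo + hi) / 2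
    if (l.getD mid (0, 0)).1 ≤ id then pvBisect id l (mid + 1) hi
    else pvBisect id l lo mid
  else lo
termination_by hi - lo
decreasing_by all_goals omega

def insert_to_sorted_list_alt (id : Int) (element : Int) (sorted_list : List (Int × Int)) : List (Int × Int) :=
  if sorted_list.length = 0 then [(id, element)]
  else PySem.List.insert sorted_list ((pvBisect id sorted_list 0 sorted_list.length : Nat) : Int) (id, element)

-- ===== PRECONDITION & SPEC =====
-- Pre_ requires every entry with id-component > id to come after every entry with id-component ≤ id
-- (true of every id-sorted list — the function's own documented assumption "Assuming y is in
-- increasing order"); on lists violating it A's linear-scan position is an artefact of its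
-- implementation and the binary search may legitimately pick another slot.
def Pre_insert_to_sorted_list (id : Int) (element : Int) (sorted_list : List (Int × Int)) : Prop :=
  ((sorted_list.dropWhile (fun p => decide (p.1 ≤ id))).all (fun p => decide (id < p.1))) = true
instance (id : Int) (element : Int) (sorted_list : List (Int × Int)) : Decidable (Pre_insert_to_sorted_list id element sorted_list) := by unfold Pre_insert_to_sorted_list; infer_instance

def pvWitness_insert_to_sorted_list : Int × Int × (List (Int × Int)) := (4, 7, [(1, 10), (3, 20), (5, 30)])

def Spec_insert_to_sorted_list (id : Int) (element : Int) (sorted_list : List (Int × Int)) (out : List (Int × Int)) : Prop := out = insert_to_sorted_list_alt id element sorted_list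
instance (id : Int) (element : Int) (sorted_list : List (Int × Int)) (out : List (Int × Int)) : Decidable (Spec_insert_to_sorted_list id element sorted_list out) := by unfold Spec_insert_to_sorted_list; infer_instance

-- ===== CLAIM (what is proved, stated in full; the proofs are below) =====
def Claim_equal_insert_to_sorted_list : Prop := ∀ (id : Int) (element : Int) (sorted_list : List (Int × Int)), Dom_insert_to_sorted_list id element sorted_list → Pre_insert_to_sorted_list id element sorted_list → Spec_insert_to_sorted_list id element sorted_list (insert_to_sorted_list id element sorted_list)

-- ===== LEMMAS AND PROOFS =====

-- the common insertion point: length of the longest prefix whose ids are ≤ id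
def pvK (id : Int) (l : List (Int × Int)) : Nat := (l.takeWhile (fun p => decide (p.1 ≤ id))).length

theorem pvK_le_length (id : Int) (l : List (Int × Int)) : pvK id l ≤ l.length := by
  induction l with
  | nil => simp [pvK]
  | cons v rest ih =>
      by_cases h : v.1 ≤ id
      · have htw : List.takeWhile (fun p => decide (p.1 ≤ id)) (v :: rest)
              = v :: List.takeWhile (fun p => decide (p.1 ≤ id)) rest :=
          List.takeWhile_cons_of_pos (by simpa using h)
        simp only [pvK, htw, List.length_cons] at ih ⊢
        omega
      · simp [pvK, h]

-- A's scan inserts at index idx + pvK of the remaining list (appending when everything is ≤ id)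
theorem pvAScan_eq (id element : Int) (orig : List (Int × Int)) :
    ∀ (l : List (Int × Int)) (idx : Nat), idx + pvK id l ≤ orig.length →
      pvAScan id element orig l idx =
        PySem.List.insert orig ((idx + pvK id l : Nat) : Int) (id, element) ∨
      (pvAScan id element orig l idx = orig ++ [(id, element)] ∧ pvK id l = l.length) := by
  intro l
  induction l with
  | nil => intro idx _; right; simp [pvAScan, pvK]
  | cons v rest ih =>
      intro idx h
      by_cases hv : v.1 > id
      · left
        have hk : pvK id (v :: rest) = 0 := by
          simp [pvK, show ¬ v.1 ≤ id by omega]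
        simp [pvAScan, hv, hk]
      · have hk : pvK id (v :: rest) = pvK id rest + 1 := by
          simp [pvK, show v.1 ≤ id by omega]
        have h' : (idx + 1) + pvK id rest ≤ orig.length := by omega
        rcases ih (idx + 1) h' with h1 | ⟨h1, h2⟩
        · left
          rw [show idx + pvK id (v :: rest) = (idx + 1) + pvK id rest by omega]
          simpa [pvAScan, hv] using h1
        · right
          constructor
          · simpa [pvAScan, hv] using h1
          · simp [hk, h2, List.length_cons]

-- characterisation of pvK on a sorted list: below it every id is ≤, from it on every id is >
theorem pvK_lt (id : Int) (l : List (Int × Int)) :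
    ∀ i, i < pvK id l → (l.getD i (0, 0)).1 ≤ id := by
  induction l with
  | nil => intro i h; simp [pvK] at h
  | cons v rest ih =>
      intro i h
      by_cases hv : v.1 ≤ id
      · have hk : pvK id (v :: rest) = pvK id rest + 1 := by
          simp [pvK, hv]
        cases i with
        | zero => simpa using hv
        | succ j =>
            have : j < pvK id rest := by omega
            simpa using ih j this
      · have hk : pvK id (v :: rest) = 0 := by simp [pvK, hv]
        omega

theorem pvK_ge (id : Int) (l : List (Int × Int))
    (hs : ((l.dropWhile (fun p => decide (p.1 ≤ id))).all (fun p => decide (id < p.1))) = true) :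
    ∀ i, pvK id l ≤ i → i < l.length → id < (l.getD i (0, 0)).1 := by
  intro i h1 h2
  have hdrop : l.dropWhile (fun p => decide (p.1 ≤ id)) = l.drop (pvK id l) := by
    clear hs h1 h2 i
    induction l with
    | nil => simp [pvK]
    | cons v rest ih =>
        by_cases hv : v.1 ≤ id
        · have hk : pvK id (v :: rest) = pvK id rest + 1 := by simp [pvK, hv]
          simp [hv, hk, ih]
        · have hk : pvK id (v :: rest) = 0 := by simp [pvK, hv]
          simp [hv, hk]
  have hi' : i - pvK id l < (l.drop (pvK id l)).length := by
    simp [List.length_drop]; omega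
  have hmem : l.getD i (0, 0) ∈ l.dropWhile (fun p => decide (p.1 ≤ id)) := by
    rw [hdrop]
    have : (l.drop (pvK id l)).getD (i - pvK id l) (0, 0) = l.getD i (0, 0) := by
      rw [List.getD_eq_getElem _ _ hi', List.getD_eq_getElem _ _ h2, List.getElem_drop]
      congr 1; omega
    rw [← this, List.getD_eq_getElem _ _ hi']
    exact List.getElem_mem hi'
  simpa using List.all_eq_true.mp hs _ hmem

-- the binary search converges to pvK whenever the invariant lo ≤ pvK ≤ hi ≤ len holds
theorem pvBisect_eq (id : Int) (l : List (Int × Int))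
    (hs : ((l.dropWhile (fun p => decide (p.1 ≤ id))).all (fun p => decide (id < p.1))) = true) :
    ∀ lo hi, hi ≤ l.length → lo ≤ pvK id l → pvK id l ≤ hi → pvBisect id l lo hi = pvK id l := by
  intro lo hi
  induction hn : hi - lo using Nat.strong_induction_on generalizing lo hi with
  | _ n ih =>
      intro hhi hlo hk
      rw [pvBisect]
      by_cases h : lo < hi
      · simp only [h, dif_pos]
        set mid := (lo + hi) / 2 with hmid
        have hm1 : lo ≤ mid := by omega
        have hm2 : mid < hi := by omega
        by_cases hc : (l.getD mid (0, 0)).1 ≤ id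
        · have : mid < pvK id l := by
            by_contra hcon
            have := pvK_ge id l hs mid (by omega) (by omega)
            omega
          simp only [hc, if_pos]
          exact ih (hi - (mid + 1)) (by omega) (mid + 1) hi rfl hhi (by omega) hk
        · have : pvK id l ≤ mid := by
            by_contra hcon
            exact hc (pvK_lt id l mid (by omega))
          simp only [hc, if_neg, not_false_iff]
          exact ih (mid - lo) (by omega) lo mid rfl (by omega) hlo this
      · simp only [h, dif_neg, not_false_iff]
        omega

-- ===== VERDICT (by name: the statement is the Claim_ definition above) =====
theorem insert_to_sorted_list_spec : Claim_equal_insert_to_sorted_list := by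
  intro id element l _hdom hpre
  unfold Spec_insert_to_sorted_list insert_to_sorted_list insert_to_sorted_list_alt
  by_cases hnil : l.length = 0
  · simp [hnil]
  · simp only [hnil, if_neg, not_false_iff]
    have hbs : pvBisect id l 0 l.length = pvK id l :=
      pvBisect_eq id l hpre 0 l.length le_rfl (Nat.zero_le _) (pvK_le_length id l)
    rw [hbs]
    rcases pvAScan_eq id element l l 0 (by simpa using pvK_le_length id l) with h | ⟨h, hfull⟩
    · simpa using h
    · rw [h, hfull]
      exact (PySem.List.insert_len l (id, element)).symm
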